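-- pv_equiv track=rewrite | github.com/Nickydoesthings/Vistran | main.py | post_process_ocr
-- ===== SOURCE A (Python) =====
-- def post_process_ocr(text):
--     # Replace common misrecognitions
--     corrections = {
--         '0': '〇',
--         '1': '一',
--         # Add more based on observed errors
--     }
--     for wrong, correct in corrections.items():
--         text = text.replace(wrong, correct)
--     return text
-- ===== SOURCE B (Python) =====
-- def post_process_ocr(text):
--     # Single pass over characters: each char is mapped through the corrections
--     # dict (or passed through), instead of one full-string replace per entry.
--     corrections = {
--         '0': '〇',
--         '1': '一',
--     }
--     return ''.join(corrections.get(c, c) for c in text)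
-- ===== Notes on version B (the rewrite author's own statement) =====
-- stated objective: idiomatic
-- what changed: One character-level pass building the output joining per-character dict lookups, instead of one full-string text.replace scan per corrections entry.
import Mathlib
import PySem

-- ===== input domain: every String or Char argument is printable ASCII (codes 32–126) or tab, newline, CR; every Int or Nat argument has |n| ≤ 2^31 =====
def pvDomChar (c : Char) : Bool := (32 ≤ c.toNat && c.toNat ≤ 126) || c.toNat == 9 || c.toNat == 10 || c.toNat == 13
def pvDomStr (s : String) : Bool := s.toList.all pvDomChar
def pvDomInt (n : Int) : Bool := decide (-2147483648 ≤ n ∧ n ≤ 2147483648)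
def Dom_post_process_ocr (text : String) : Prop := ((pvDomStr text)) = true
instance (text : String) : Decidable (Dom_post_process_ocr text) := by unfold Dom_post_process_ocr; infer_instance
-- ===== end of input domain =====

-- B replaces the per-correction full-string replace loop with one character-level
-- pass (dict lookup per character, joined); proved equal to A on all inputs in Dom.


-- ===== PORT A =====
-- A: corrections dict, then for each (wrong, correct) pair in order, text = text.replace(wrong, correct)
def post_process_ocr (text : String) : String :=
  let corrections : PySem.Dict String String :=
    (PySem.Dict.empty.insert "0" "〇").insert "1" "一"
  corrections.items.foldl (fun t wc => PySem.Str.replace t wc.1 wc.2) text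

-- ===== PORT B =====
-- B: join of corrections.get(c, c) over the characters of text
def pvCorrections : PySem.Dict String String :=
  (PySem.Dict.empty.insert "0" "〇").insert "1" "一"

def post_process_ocr_alt (text : String) : String :=
  PySem.Str.join "" (text.toList.map (fun c =>
    pvCorrections.getD (String.ofList [c]) (String.ofList [c])))

-- ===== PRECONDITION & SPEC =====
def Spec_post_process_ocr (text : String) (out : String) : Prop := out = post_process_ocr_alt text
instance (text : String) (out : String) : Decidable (Spec_post_process_ocr text out) := by unfold Spec_post_process_ocr; infer_instance

-- ===== CLAIM (what is proved, stated in full; the proofs are below) =====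
def Claim_equal_post_process_ocr : Prop := ∀ (text : String), Dom_post_process_ocr text → Spec_post_process_ocr text (post_process_ocr text)

-- ===== LEMMAS AND PROOFS =====

-- replace with a single-character pattern is a flatMap over the characters
lemma replace_go_single (a : Char) (new : List Char) :
    ∀ (l : List Char) (fuel : Nat) (acc : List Char), l.length ≤ fuel →
    PySem.Chars.replace.go [a] new fuel l acc =
      acc.reverse ++ l.flatMap (fun c => if c = a then new else [c]) := by
  intro l
  induction l with
  | nil =>
      intro fuel acc _
      cases fuel <;> simp [PySem.Chars.replace.go]
  | cons c t ih =>
      intro fuel acc hle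
      cases fuel with
      | zero => simp at hle
      | succ m =>
          by_cases hc : c = a
          · subst hc
            simp only [PySem.Chars.replace.go, List.isPrefixOf, BEq.rfl, Bool.true_and,
              List.isPrefixOf_nil_left, if_true, List.length_cons, List.drop_succ_cons,
              List.drop_zero, List.flatMap_cons]
            simp only [List.length_nil, List.drop_zero]
            rw [ih m (new.reverse ++ acc) (by simpa using hle)]
            simp
          · have hpre : [a].isPrefixOf (c :: t) = false := by
              simp [List.isPrefixOf, hc]
              exact fun h => absurd h.symm hc
            simp only [PySem.Chars.replace.go, hpre, if_neg, Bool.false_eq_true,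
              not_false_iff, List.flatMap_cons]
            rw [ih m (c :: acc) (by simpa using hle)]
            simp [hc]

lemma replace_single (a : Char) (new : List Char) (l : List Char) :
    PySem.Chars.replace l [a] new = l.flatMap (fun c => if c = a then new else [c]) := by
  simpa using replace_go_single a new l l.length [] le_rfl

lemma join_nil_eq_flatten (parts : List (List Char)) :
    PySem.Chars.join [] parts = parts.flatten := by
  simp [PySem.Chars.join, List.intercalate]
  induction parts with
  | nil => simp
  | cons p ps ih =>
      cases ps with
      | nil => simp [List.intersperse]
      | cons q qs =>
          simp [List.intersperse] at ih ⊢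
          exact ih

theorem post_process_ocr_spec : Claim_equal_post_process_ocr := by
  intro text _
  unfold Spec_post_process_ocr
  have hA : post_process_ocr text =
      PySem.Str.replace (PySem.Str.replace text "0" "〇") "1" "一" := rfl
  rw [hA]
  unfold post_process_ocr_alt
  rw [← String.toList_inj]
  rw [PySem.Str.toList_replace, PySem.Str.toList_replace, PySem.Str.toList_join]
  rw [show ("0".toList) = ['0'] from rfl, show ("〇".toList) = ['〇'] from rfl,
    show ("1".toList) = ['1'] from rfl, show ("一".toList) = ['一'] from rfl]
  rw [show ("".toList) = ([] : List Char) from rfl, replace_single, replace_single, join_nil_eq_flatten]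
  induction text.toList with
  | nil => rfl
  | cons c t ih =>
      simp only [List.flatMap_cons, List.flatMap_append, List.map_cons, List.flatten_cons]
      rw [ih]
      congr 1
      by_cases h0 : c = '0'
      · subst h0; decide
      · by_cases h1 : c = '1'
        · subst h1; decide
        · have hne0 : (String.ofList [c]) ≠ "0" := by
            intro h; apply h0
            have := congrArg String.toList h; simpa using this
          have hne1 : (String.ofList [c]) ≠ "1" := by
            intro h; apply h1
            have := congrArg String.toList h; simpa using this
          have hget : pvCorrections.getD (String.ofList [c]) (String.ofList [c]) = String.ofList [c] := by
            simp [pvCorrections, PySem.Dict.getD, PySem.Dict.get?, PySem.Dict.empty,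
              PySem.Dict.insert, List.find?, beq_iff_eq, Ne.symm hne0, Ne.symm hne1,
              beq_eq_false_iff_ne.mpr (Ne.symm hne1)]
          rw [hget]
          simp [h0, h1]
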